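-- pv_equiv track=rewrite | github.com/MrBrantCode/unitest_baseline | mut_generate/mist_train_cf/cf_15200/solution.py | generate_array
-- ===== SOURCE A (Python) =====
-- def generate_array(N):
--     arr = [[0] * N for _ in range(N)]
--     row_sums = [N] * N
--     col_sums = [N] * N
--
--     for i in range(N):
--         for j in range(N):
--             if row_sums[i] > 0 and col_sums[j] > 0:
--                 arr[i][j] = 1
--                 row_sums[i] -= 1
--                 col_sums[j] -= 1
--
--     return arr
-- ===== SOURCE B (Python) =====
-- def generate_array(N):
--     # The simulation in A always fills every cell with 1 (each row/column budget
--     # starts at N and is decremented at most N times), so build the all-ones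
--     # matrix directly.
--     return [[1] * N for _ in range(N)]
-- ===== Notes on version B (the rewrite author's own statement) =====
-- stated objective: simpler
-- what changed: Replaces the stateful row/column-budget simulation (row_sums/col_sums arrays and a guarded per-cell update) with a direct closed-form construction of the all-ones N x N matrix.
import Mathlib
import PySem

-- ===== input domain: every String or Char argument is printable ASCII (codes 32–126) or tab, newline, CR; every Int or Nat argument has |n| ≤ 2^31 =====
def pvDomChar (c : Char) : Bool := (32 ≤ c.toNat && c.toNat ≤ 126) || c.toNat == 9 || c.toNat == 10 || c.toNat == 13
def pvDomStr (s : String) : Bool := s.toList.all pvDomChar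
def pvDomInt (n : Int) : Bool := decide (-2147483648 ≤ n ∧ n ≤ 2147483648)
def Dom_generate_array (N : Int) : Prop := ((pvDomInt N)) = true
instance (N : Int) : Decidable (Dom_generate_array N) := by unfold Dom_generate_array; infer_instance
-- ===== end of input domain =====

-- B replaces A's stateful row/column-budget simulation by the closed-form all-ones matrix (objective: simpler/faster construction).

-- ===== PORT A =====
-- body of the inner loop of A: the guarded cell update on the state (arr, row_sums, col_sums);
-- all indices come from range(N) and are in range, so pyGetD/pySetD are exact here
def pvBodyA (i : Int) (st : List (List Int) × List Int × List Int) (j : Int) :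
    List (List Int) × List Int × List Int :=
  let arr := st.1
  let rows := st.2.1
  let cols := st.2.2
  if PySem.List.pyGetD rows i 0 > 0 ∧ PySem.List.pyGetD cols j 0 > 0 then
    (PySem.List.pySetD arr i (PySem.List.pySetD (PySem.List.pyGetD arr i []) j 1),
     PySem.List.pySetD rows i (PySem.List.pyGetD rows i 0 - 1),
     PySem.List.pySetD cols j (PySem.List.pyGetD cols j 0 - 1))
  else st

def generate_array (N : Int) : List (List Int) :=
  let rng := PySem.List.pyRange 0 N 1
  let arr := rng.map (fun _ => PySem.List.pyRepeat [(0 : Int)] N)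
  let row_sums := PySem.List.pyRepeat [N] N
  let col_sums := PySem.List.pyRepeat [N] N
  (rng.foldl (fun st i => rng.foldl (pvBodyA i) st) (arr, row_sums, col_sums)).1

-- ===== PORT B =====
def generate_array_alt (N : Int) : List (List Int) :=
  (PySem.List.pyRange 0 N 1).map (fun _ => PySem.List.pyRepeat [(1 : Int)] N)

-- ===== PRECONDITION & SPEC =====
def Spec_generate_array (N : Int) (out : List (List Int)) : Prop := out = generate_array_alt N
instance (N : Int) (out : List (List Int)) : Decidable (Spec_generate_array N out) := by unfold Spec_generate_array; infer_instance

-- ===== CLAIM (what is proved, stated in full; the proofs are below) =====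
def Claim_equal_generate_array : Prop := ∀ (N : Int), Dom_generate_array N → Spec_generate_array N (generate_array N)

-- ===== LEMMAS AND PROOFS =====

theorem pvGetD_append_len {α : Type} : ∀ (P : List α) (r : α) (S : List α) (d : α),
    (P ++ r :: S).getD P.length d = r := by
  intro P r S d
  induction P with
  | nil => rfl
  | cons a P ih => simpa using ih

theorem pvSet_append_len {α : Type} : ∀ (P : List α) (r v : α) (S : List α),
    (P ++ r :: S).set P.length v = P ++ v :: S := by
  intro P r v S
  induction P with
  | nil => rfl
  | cons a P ih => simpa using ih

theorem pvTake_succ_set {α : Type} : ∀ (row : List α) (j : ℕ) (v : α), j < row.length →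
    (row.set j v).take (j + 1) = row.take j ++ [v] := by
  intro row
  induction row with
  | nil => intro j v h; simp at h
  | cons a row ih =>
    intro j v h
    cases j with
    | zero => simp
    | succ j => simpa using ih j v (by simpa using h)

theorem pv_inner (i : ℕ) (c : Int) (hc : 0 < c) :
    ∀ (m j₀ : ℕ) (P S : List (List Int)) (row : List Int) (Pr Sr : List Int),
      P.length = i → Pr.length = i → row.length = j₀ + m →
      List.foldl (pvBodyA (i : ℤ))
        (P ++ row :: S, Pr ++ (m : Int) :: Sr, List.replicate j₀ (c - 1) ++ List.replicate m c)
        (PySem.List.pyRange (j₀ : ℤ) ((j₀ : ℤ) + (m : ℤ)) 1)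
      = (P ++ (row.take j₀ ++ List.replicate m 1) :: S, Pr ++ (0 : Int) :: Sr,
         List.replicate (j₀ + m) (c - 1)) := by
  intro m
  induction m with
  | zero =>
    intro j₀ P S row Pr Sr hP hPr hrow
    rw [PySem.List.pyRange_one_eq_nil (by simp)]
    have ht : row.take j₀ = row := List.take_of_length_le (by omega)
    simp [ht]
  | succ m ih =>
    intro j₀ P S row Pr Sr hP hPr hrow
    rw [PySem.List.pyRange_one_cons (by push_cast; omega)]
    have hstep : pvBodyA (i : ℤ)
        (P ++ row :: S, Pr ++ ((m + 1 : ℕ) : Int) :: Sr,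
          List.replicate j₀ (c - 1) ++ List.replicate (m + 1) c) (j₀ : ℤ)
        = (P ++ (row.set j₀ 1) :: S, Pr ++ (m : Int) :: Sr,
           List.replicate (j₀ + 1) (c - 1) ++ List.replicate m c) := by
      have hcols : (List.replicate j₀ (c - 1) ++ List.replicate (m + 1) c).getD j₀ 0 = c := by
        have := pvGetD_append_len (List.replicate j₀ (c - 1)) c (List.replicate m c) (0 : Int)
        simpa [List.replicate_succ] using this
      have hrows : (Pr ++ ((m + 1 : ℕ) : Int) :: Sr).getD i 0 = ((m + 1 : ℕ) : Int) := by
        have := pvGetD_append_len Pr ((m + 1 : ℕ) : Int) Sr (0 : Int)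
        rwa [hPr] at this
      simp only [pvBodyA, PySem.List.pyGetD_natCast, PySem.List.pySetD_natCast, hcols, hrows]
      rw [if_pos ⟨by push_cast; omega, hc⟩]
      have harr : (P ++ row :: S).getD i [] = row := by
        have := pvGetD_append_len P row S ([] : List Int)
        rwa [hP] at this
      have harr' : (P ++ row :: S).set i (row.set j₀ 1) = P ++ (row.set j₀ 1) :: S := by
        have := pvSet_append_len P row (row.set j₀ 1) S
        rwa [hP] at this
      have hrows' : (Pr ++ ((m + 1 : ℕ) : Int) :: Sr).set i (((m + 1 : ℕ) : Int) - 1)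
          = Pr ++ (m : Int) :: Sr := by
        have := pvSet_append_len Pr ((m + 1 : ℕ) : Int) (((m + 1 : ℕ) : Int) - 1) Sr
        rw [hPr] at this
        rw [this]
        congr 2
        push_cast; ring
      have hcols' : (List.replicate j₀ (c - 1) ++ List.replicate (m + 1) c).set j₀ (c - 1)
          = List.replicate (j₀ + 1) (c - 1) ++ List.replicate m c := by
        have := pvSet_append_len (List.replicate j₀ (c - 1)) c (c - 1) (List.replicate m c)
        simp only [List.length_replicate] at this
        rw [List.replicate_succ] at *
        rw [this, List.replicate_succ']
        simp
      rw [harr, harr', hrows', hcols']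
    rw [List.foldl_cons, hstep]
    have hrec := ih (j₀ + 1) P S (row.set j₀ 1) Pr Sr hP hPr (by simp only [List.length_set, hrow]; omega)
    have hb : ((j₀ : ℤ) + 1) + (m : ℤ) = (j₀ : ℤ) + ((m : ℕ) + 1 : ℕ) := by push_cast; ring
    rw [show ((j₀ + 1 : ℕ) : ℤ) = (j₀ : ℤ) + 1 from by push_cast; ring] at hrec
    rw [hb] at hrec
    rw [hrec]
    have htake : (row.set j₀ 1).take (j₀ + 1) = row.take j₀ ++ [1] :=
      pvTake_succ_set row j₀ 1 (by omega)
    rw [htake]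
    have hj : j₀ + 1 + m = j₀ + (m + 1) := by omega
    rw [hj]
    simp [List.replicate_succ, List.append_assoc]

theorem pv_outer (n : ℕ) :
    ∀ (m i : ℕ), i + m = n →
      List.foldl (fun st i => List.foldl (pvBodyA i) st (PySem.List.pyRange 0 (n : ℤ) 1))
        (List.replicate i (List.replicate n (1 : Int)) ++ List.replicate m (List.replicate n (0 : Int)),
         List.replicate i (0 : Int) ++ List.replicate m (n : Int),
         List.replicate n (m : Int))
        (PySem.List.pyRange (i : ℤ) (n : ℤ) 1)
      = (List.replicate n (List.replicate n (1 : Int)), List.replicate n (0 : Int),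
         List.replicate n (0 : Int)) := by
  intro m
  induction m with
  | zero =>
    intro i hi
    obtain rfl : i = n := by omega
    rw [PySem.List.pyRange_one_eq_nil (le_refl _)]
    simp
  | succ m ih =>
    intro i hi
    rw [show PySem.List.pyRange (i : ℤ) (n : ℤ) 1
          = (i : ℤ) :: PySem.List.pyRange ((i : ℤ) + 1) (n : ℤ) 1 from
        PySem.List.pyRange_one_cons (by omega)]
    simp only [List.foldl_cons]
    have hinner := pv_inner i ((m + 1 : ℕ) : Int) (by push_cast; omega) n 0
      (List.replicate i (List.replicate n (1 : Int)))
      (List.replicate m (List.replicate n (0 : Int)))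
      (List.replicate n (0 : Int))
      (List.replicate i (0 : Int)) (List.replicate m (n : Int))
      (by simp) (by simp) (by simp)
    simp only [Nat.cast_zero, zero_add, List.replicate_zero, List.nil_append,
      List.take_zero] at hinner
    simp only [List.replicate_succ]
    rw [hinner]
    have hc1 : ((m + 1 : ℕ) : Int) - 1 = (m : Int) := by push_cast; ring
    have hca : ((i : ℤ) + 1) = ((i + 1 : ℕ) : ℤ) := by push_cast; ring
    have h1 : List.replicate i (List.replicate n (1 : Int)) ++
        List.replicate n (1 : Int) :: List.replicate m (List.replicate n (0 : Int))
        = List.replicate (i + 1) (List.replicate n (1 : Int)) ++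
          List.replicate m (List.replicate n (0 : Int)) := by
      simp [List.replicate_succ']
    have h2 : List.replicate i (0 : Int) ++ (0 : Int) :: List.replicate m (n : Int)
        = List.replicate (i + 1) (0 : Int) ++ List.replicate m (n : Int) := by
      simp [List.replicate_succ']
    rw [hc1, hca, h1, h2]
    exact ih (i + 1) (by omega)

theorem pv_map_const_pyRange (n : ℕ) (row : List Int) :
    (PySem.List.pyRange 0 (n : ℤ) 1).map (fun _ => row) = List.replicate n row := by
  rw [List.map_const']
  simp [PySem.List.length_pyRange_one]

-- ===== VERDICT (by name: the statement is the Claim_ definition above) =====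
theorem generate_array_spec : Claim_equal_generate_array := by
  intro N _
  unfold Spec_generate_array generate_array generate_array_alt
  by_cases hN : N ≤ 0
  · rw [PySem.List.pyRange_one_eq_nil hN]
    simp
  · push_neg at hN
    have hNn : N = ((N.toNat : ℕ) : ℤ) := by omega
    rw [hNn, PySem.List.pyRepeat_singleton, PySem.List.pyRepeat_singleton]
    simp only [Int.toNat_natCast]
    rw [pv_map_const_pyRange, pv_map_const_pyRange]
    have hout := pv_outer N.toNat N.toNat 0 (by omega)
    simp only [List.replicate_zero, List.nil_append, Nat.cast_zero] at hout
    rw [hout]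
    simp [PySem.List.pyRepeat_singleton]
    omega
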